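-- pv_equiv track=rewrite | github.com/FitSNAP/FitSNAP | fitsnap3lib/lib/sym_ACE/gen_labels.py | sort_pair
-- ===== SOURCE A (Python) =====
-- import math
--
-- def flatten(lstoflsts):
--     try:
--         flat = [i for sublist in lstoflsts for i in sublist]
--         return flat
--     except TypeError:
--         return lstoflsts
--
-- def sort_pair(l):
--     uniques = sorted(list(set(l)))
--     ltmp = l.copy()
--     ltmp.sort(key = lambda x : ltmp.count(x),reverse = True)
--     uniques.sort(key = lambda x : ltmp.index(x), reverse=False)
--     unique_inds = [i for i in range(len(uniques))]
--     mp = {u:ind for ind,u in enumerate(uniques)}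
--     revmp = {ind:u for ind,u in enumerate(uniques)}
--     per_unique = {u:[] for u in unique_inds}
--     mapped_l = [mp[li] for li in l]
--     for li in mapped_l:
--         per_unique[li].append(li)
--     unsorted_tups = []
--     for lui in unique_inds:
--         countu = mapped_l.count(lui)
--         if countu %2 ==0:
--             nd = int(countu/2)
--             resid = 0
--         elif countu %2 !=0:
--             nd = math.floor(countu/2)
--             resid = 1
--         pairls = [tuple([lui]*2)]*nd
--         residls = [tuple([lui])]*resid
--         unsorted_tups.append(pairls)
--         unsorted_tups.append(residls)
--     tups = sorted(flatten(unsorted_tups))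
--     tups.sort(key = lambda x : len(x),reverse = True)
--     resorted = flatten(tups)
--     resorted_return = [revmp[k] for k in resorted]
--     return resorted_return
-- ===== SOURCE B (Python) =====
-- def sort_pair(l):
--     # One pass to count occurrences; dict preserves first-occurrence order.
--     counts = {}
--     for x in l:
--         counts[x] = counts.get(x, 0) + 1
--     pairs = []
--     residuals = []
--     for x, c in counts.items():
--         pairs += [x] * (2 * (c // 2))
--         if c % 2:
--             residuals.append(x)
--     return pairs + residuals
-- ===== Notes on version B (the rewrite author's own statement) =====
-- stated objective: faster
-- what changed: A's frequency sort is a no-op (its key calls ltmp.count while CPython has detached the list, so every key is 0), so A really orders values by first occurrence and then builds index maps, per-value tuple lists and two sorts; B replaces all of that with one counting pass over l and one pass over the counter's insertion order emitting the paired copies and then the odd leftovers.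
import Mathlib
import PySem

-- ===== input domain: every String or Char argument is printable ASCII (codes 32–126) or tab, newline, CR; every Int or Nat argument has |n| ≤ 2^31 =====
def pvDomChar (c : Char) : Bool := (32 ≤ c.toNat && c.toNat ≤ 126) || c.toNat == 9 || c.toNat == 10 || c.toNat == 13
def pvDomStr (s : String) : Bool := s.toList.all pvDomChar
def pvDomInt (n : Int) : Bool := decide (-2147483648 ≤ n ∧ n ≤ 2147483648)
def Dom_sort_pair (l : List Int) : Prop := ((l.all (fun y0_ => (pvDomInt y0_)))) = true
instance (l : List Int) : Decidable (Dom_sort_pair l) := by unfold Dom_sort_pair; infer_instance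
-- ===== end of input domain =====

-- B replaces A's dead frequency sort (its key reads the list CPython detaches during sort, so it is a no-op),
-- index-map dicts, tuple lists and double sort by one counting pass and one emission pass (faster).


-- ===== PORT A =====
-- flatten(lstoflsts): the try-branch succeeds on a list of lists (no TypeError), so it is List.flatten here.
def pyflatten (xs : List (List (List Int))) : List (List Int) := xs.flatten

def sort_pair (l : List Int) : List Int :=
  let uniques0 := PySem.List.sorted (PySem.Set.ofList l) (fun x => x) false
  -- ltmp.sort(key=lambda x: ltmp.count(x), reverse=True): CPython detaches the list while sorting,
  -- so ltmp.count(x) is 0 for every x; the stable reverse sort with all-equal keys is what we port.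
  let ltmp := PySem.List.sorted l (fun _ => (0 : Int)) true
  -- ltmp.index(x) raises only for x ∉ ltmp; every unique is in ltmp, so the getD default is never used.
  let uniques := PySem.List.sorted uniques0 (fun x => (PySem.List.index? ltmp x).getD 0) false
  let unique_inds := PySem.List.pyRange 0 (uniques.length : Int) 1
  let mp : PySem.Dict Int Int :=
    (PySem.List.enumerate uniques 0).foldl (fun d p => d.insert p.2 p.1) PySem.Dict.empty
  let revmp : PySem.Dict Int Int :=
    (PySem.List.enumerate uniques 0).foldl (fun d p => d.insert p.1 p.2) PySem.Dict.empty
  let per_unique0 : PySem.Dict Int (List Int) :=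
    unique_inds.foldl (fun d u => d.insert u []) PySem.Dict.empty
  -- mp[li]: the key is always present, so the getD default is never used.
  let mapped_l := l.map (fun li => (mp.get? li).getD 0)
  -- per_unique[li].append(li)
  let _per_unique := mapped_l.foldl (fun d li => d.modify li [] (fun s => s ++ [li])) per_unique0
  let unsorted_tups := unique_inds.foldl (fun acc lui =>
      let countu := PySem.List.count mapped_l lui
      -- int(countu/2) (exact float halving of an even count) and math.floor(countu/2) are both countu / 2
      let nd := if countu % 2 == 0 then countu / 2 else countu / 2
      let resid := if countu % 2 == 0 then 0 else 1
      let pairls := PySem.List.pyRepeat [PySem.List.pyRepeat [lui] 2] (nd : Int)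
      let residls := PySem.List.pyRepeat [[lui]] (resid : Int)
      (acc ++ [pairls]) ++ [residls]) ([] : List (List (List Int)))
  let tups1 := PySem.List.sorted (pyflatten unsorted_tups) (fun x => x) false
  let tups := PySem.List.sorted tups1 (fun x => (x.length : Int)) true
  let resorted := tups.flatten
  -- revmp[k]: the key is always present, so the getD default is never used.
  resorted.map (fun k => (revmp.get? k).getD 0)

-- ===== PORT B =====
def sort_pair_alt (l : List Int) : List Int :=
  let counts := l.foldl (fun d x => d.insert x (d.getD x 0 + 1)) (PySem.Dict.empty : PySem.Dict Int Int)
  let pr := counts.items.foldl (fun (pr : List Int × List Int) xc =>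
      let pairs := pr.1 ++ PySem.List.pyRepeat [xc.1] (2 * PySem.Int.floordiv xc.2 2)
      if PySem.Int.mod xc.2 2 ≠ 0 then (pairs, pr.2 ++ [xc.1]) else (pairs, pr.2))
    ([], [])
  pr.1 ++ pr.2

-- ===== PRECONDITION & SPEC =====
def Spec_sort_pair (l : List Int) (out : List Int) : Prop := out = sort_pair_alt l
instance (l : List Int) (out : List Int) : Decidable (Spec_sort_pair l out) := by unfold Spec_sort_pair; infer_instance

-- ===== CLAIM (what is proved, stated in full; the proofs are below) =====
def Claim_equal_sort_pair : Prop := ∀ (l : List Int), Dom_sort_pair l → Spec_sort_pair l (sort_pair l)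

-- ===== LEMMAS AND PROOFS =====
-- common normal form both ports are reduced to

def nfPairs (l : List Int) : List Int :=
  (PySem.Set.ofList l).flatMap (fun x => List.replicate (2 * (l.count x / 2)) x)
def nfResid (l : List Int) : List Int :=
  (PySem.Set.ofList l).flatMap (fun x => if l.count x % 2 = 1 then [x] else [])

-- ===================== generic helpers =====================
theorem sorted_ext {α κ : Type} {i1 i2 : LT κ} {d1 : @DecidableLT κ i1} {d2 : @DecidableLT κ i2}
    (xs : List α) (key : α → κ) (rev : Bool) (h : i1 = i2) :
    @PySem.List.sorted α κ i1 d1 xs key rev = @PySem.List.sorted α κ i2 d2 xs key rev := by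
  subst h
  have hd : d1 = d2 := funext fun a => funext fun b => Subsingleton.elim _ _
  rw [hd]

theorem pairwise_const_le (l : List Int) :
    List.Pairwise (fun (_ _ : Int) => (0:Int) ≤ 0) l := by
  induction l with
  | nil => exact .nil
  | cons a t ih => exact .cons (fun _ _ => le_refl 0) ih

theorem ltmp_eq (l : List Int) : PySem.List.sorted l (fun _ => (0:Int)) true = l := by
  refine Eq.trans (sorted_ext _ _ _ rfl) (PySem.List.sorted_rev_eq_self_of_pairwise _ _ ?_)
  exact pairwise_const_le l

-- first-occurrence order of set(l)
theorem ofList_concat (l : List Int) (x : Int) :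
    PySem.Set.ofList (l ++ [x]) = PySem.Set.add (PySem.Set.ofList l) x := by
  rw [PySem.Set.ofList_eq_foldl, PySem.Set.ofList_eq_foldl, List.foldl_append]
  rfl

theorem idx_lt_length {l : List Int} {x : Int} (h : x ∈ l) :
    (PySem.List.index? l x).getD 0 < l.length := by
  have hs : (PySem.List.index? l x).isSome = true := (PySem.List.index?_isSome_iff l x).mpr h
  obtain ⟨k, hk⟩ := Option.isSome_iff_exists.mp hs
  obtain ⟨hklt, -, -⟩ := PySem.List.getElem_of_index?_eq_some hk
  rw [hk]
  simpa using hklt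

theorem pairwise_idx (l : List Int) :
    (PySem.Set.ofList l).Pairwise
      (fun a b => (PySem.List.index? l a).getD 0 < (PySem.List.index? l b).getD 0) := by
  induction l using List.reverseRecOn with
  | nil => exact .nil
  | append_singleton t x ih =>
    rw [ofList_concat]
    by_cases hx : x ∈ t
    · have hc : (PySem.Set.ofList t).contains x = true := by
        simpa using (PySem.Set.mem_ofList t x).mpr hx
      rw [PySem.Set.add, if_pos hc]
      refine ih.imp_of_mem ?_
      intro a b ha hb hab
      have ha' : a ∈ t := (PySem.Set.mem_ofList t a).mp ha
      have hb' : b ∈ t := (PySem.Set.mem_ofList t b).mp hb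
      rwa [PySem.List.index?_append_of_mem _ ha', PySem.List.index?_append_of_mem _ hb']
    · have hc : (PySem.Set.ofList t).contains x = false := by
        rw [← Bool.not_eq_true]
        intro hcon
        exact hx ((PySem.Set.mem_ofList t x).mp (by simpa using hcon))
      rw [PySem.Set.add, hc]
      simp only [Bool.false_eq_true, if_false]
      rw [List.pairwise_append]
      refine ⟨?_, .cons (fun y hy => absurd hy (List.not_mem_nil)) .nil, ?_⟩
      · refine ih.imp_of_mem ?_
        intro a b ha hb hab
        have ha' : a ∈ t := (PySem.Set.mem_ofList t a).mp ha
        have hb' : b ∈ t := (PySem.Set.mem_ofList t b).mp hb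
        rwa [PySem.List.index?_append_of_mem _ ha', PySem.List.index?_append_of_mem _ hb']
      · intro a ha b hb
        have ha' : a ∈ t := (PySem.Set.mem_ofList t a).mp ha
        have hb' : b = x := by simpa using hb
        rw [hb', PySem.List.index?_append_of_mem _ ha',
          PySem.List.index?_append_singleton_self t x hx]
        simpa using idx_lt_length ha'

theorem uniques_sorted_eq (l : List Int) :
    PySem.List.sorted (PySem.List.sorted (PySem.Set.ofList l) (fun x => x) false)
      (fun x => (PySem.List.index? l x).getD 0) false = PySem.Set.ofList l := by
  have h2 := PySem.List.sorted_eq_of_perm_of_pairwise_lt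
    (PySem.List.sorted (PySem.Set.ofList l) (fun x => x) false) (PySem.Set.ofList l)
    (fun x => (PySem.List.index? l x).getD 0)
    (PySem.List.sorted_perm _ _ _).symm (pairwise_idx l)
  exact (sorted_ext _ _ _ rfl).trans h2

-- ===================== dict lookup lemmas =====================
theorem fold_ins_untouched (ps : List (Int × Int)) :
    ∀ (d : PySem.Dict Int Int) (x : Int), (∀ p ∈ ps, p.1 ≠ x) →
    ((ps.foldl (fun d p => d.insert p.1 p.2) d).get? x) = d.get? x := by
  induction ps with
  | nil => intro d x _; rfl
  | cons p t ih =>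
    intro d x h
    simp only [List.foldl_cons]
    rw [ih _ x (fun q hq => h q (List.mem_cons_of_mem p hq))]
    exact PySem.Dict.get?_insert_of_ne d p.2 (Ne.symm (h p List.mem_cons_self))

theorem fold_enum_get? (u : List Int) :
    ∀ (s : Int) (d0 : PySem.Dict Int Int) (j : Nat), j < u.length →
    (((PySem.List.enumerate u s).foldl (fun d p => d.insert p.1 p.2) d0).get? (s + (j : Int)))
      = some (u.getD j 0) := by
  induction u with
  | nil => intro s d0 j hj; simp at hj
  | cons y t ih =>
    intro s d0 j hj
    have henum : PySem.List.enumerate (y :: t) s = (s, y) :: PySem.List.enumerate t (s + 1) := by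
      simp [PySem.List.enumerate]
    rw [henum]
    simp only [List.foldl_cons]
    cases j with
    | zero =>
      rw [fold_ins_untouched _ _ _ ?_]
      · simpa using PySem.Dict.get?_insert_self d0 s y
      · intro p hp
        obtain ⟨k, hk, rfl⟩ := (PySem.List.mem_enumerate_iff t (s+1) p).mp hp
        simp only []
        omega
    | succ j' =>
      have harg : s + ((j' + 1 : Nat) : Int) = (s + 1) + (j' : Int) := by push_cast; ring
      rw [harg, ih (s+1) _ j' (by simpa using hj)]
      simp

theorem fold_swap_get? (u : List Int) :
    ∀ (s : Int) (d0 : PySem.Dict Int Int) (x : Int), u.Nodup →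
    (((PySem.List.enumerate u s).foldl (fun d p => d.insert p.2 p.1) d0).get? x)
      = if x ∈ u then some (s + (((PySem.List.index? u x).getD 0 : Nat) : Int)) else d0.get? x := by
  induction u with
  | nil => intro s d0 x _; simp
  | cons y t ih =>
    intro s d0 x hnd
    have henum : PySem.List.enumerate (y :: t) s = (s, y) :: PySem.List.enumerate t (s + 1) := by
      simp [PySem.List.enumerate]
    rw [henum]
    simp only [List.foldl_cons]
    rw [ih (s+1) _ x (List.Nodup.of_cons hnd)]
    by_cases hxt : x ∈ t
    · have hxy : y ≠ x := by
        intro he; exact (List.nodup_cons.mp hnd).1 (he ▸ hxt)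
      rw [if_pos hxt, if_pos (List.mem_cons_of_mem y hxt)]
      rw [PySem.List.index?_cons_of_ne t hxy]
      have hs : (PySem.List.index? t x).isSome = true := (PySem.List.index?_isSome_iff t x).mpr hxt
      obtain ⟨k, hk⟩ := Option.isSome_iff_exists.mp hs
      rw [hk]
      simp only [Option.map_some, Option.getD_some]
      congr 1
      push_cast
      ring
    · rw [if_neg hxt]
      by_cases hxy : x = y
      · subst hxy
        rw [if_pos (List.mem_cons_self), PySem.List.index?_cons_self]
        simpa using PySem.Dict.get?_insert_self d0 x s
      · rw [if_neg (by simp [hxy, hxt])]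
        exact PySem.Dict.get?_insert_of_ne d0 s hxy

-- ===================== insertBy / stable partition =====================
theorem insertBy_cons_false {α : Type} (bef : α → α → Bool) (x y : α) (ys : List α)
    (h : bef x y = false) :
    PySem.List.insertBy bef x (y :: ys) = y :: PySem.List.insertBy bef x ys := by
  simp [PySem.List.insertBy, h]

theorem insertBy_cons_true {α : Type} (bef : α → α → Bool) (x y : α) (ys : List α)
    (h : bef x y = true) :
    PySem.List.insertBy bef x (y :: ys) = x :: y :: ys := by
  simp [PySem.List.insertBy, h]

theorem insertBy_mid {α : Type} (bef : α → α → Bool) (x : α) :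
    ∀ (A B : List α), (∀ a ∈ A, bef x a = false) → (∀ b ∈ B, bef x b = true) →
    PySem.List.insertBy bef x (A ++ B) = A ++ x :: B := by
  intro A
  induction A with
  | nil =>
    intro B _ hB
    cases B with
    | nil => simp [PySem.List.insertBy]
    | cons b bs => simpa using insertBy_cons_true bef x b bs (hB b List.mem_cons_self)
  | cons a A' ih =>
    intro B hA hB
    rw [List.cons_append, insertBy_cons_false bef x a _ (hA a List.mem_cons_self),
      ih B (fun q hq => hA q (List.mem_cons_of_mem a hq)) hB]
    rfl

theorem partition_fold (key : List Int → Int) (hi lo : Int) (hlo : lo < hi) :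
    ∀ (xs A B : List (List Int)), (∀ x ∈ xs, key x = hi ∨ key x = lo) →
    (∀ a ∈ A, key a = hi) → (∀ b ∈ B, key b = lo) →
    xs.foldl (fun acc x => PySem.List.insertBy (fun a b => decide (key b < key a)) x acc) (A ++ B)
    = (A ++ xs.filter (fun x => key x == hi)) ++ (B ++ xs.filter (fun x => key x == lo)) := by
  intro xs
  induction xs with
  | nil => intro A B _ _ _; simp
  | cons x t ih =>
    intro A B hxs hA hB
    simp only [List.foldl_cons]
    rcases hxs x List.mem_cons_self with hx | hx
    · have hins : PySem.List.insertBy (fun a b => decide (key b < key a)) x (A ++ B)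
          = (A ++ [x]) ++ B := by
        rw [insertBy_mid _ x A B ?_ ?_, List.append_assoc]
        · rfl
        · intro a ha; simp [hA a ha, hx]
        · intro b hb; simp [hB b hb, hx, hlo]
      rw [hins, ih (A ++ [x]) B (fun q hq => hxs q (List.mem_cons_of_mem x hq)) ?_ hB]
      · have h1 : (key x == hi) = true := by simp [hx]
        have h2 : (key x == lo) = false := by simp [hx]; omega
        simp [List.filter_cons, h1, h2]
      · intro a ha
        rcases List.mem_append.mp ha with h | h
        · exact hA a h
        · simpa using (by simpa using h : a = x) ▸ hx
    · have hins : PySem.List.insertBy (fun a b => decide (key b < key a)) x (A ++ B)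
          = A ++ (B ++ [x]) := by
        rw [PySem.List.insertBy_of_forall_not_before _ x (A ++ B) ?_, List.append_assoc]
        intro y hy
        rcases List.mem_append.mp hy with h | h
        · simp [hA y h, hx]; omega
        · simp [hB y h, hx]
      rw [hins, ih A (B ++ [x]) (fun q hq => hxs q (List.mem_cons_of_mem x hq)) hA ?_]
      · have h1 : (key x == hi) = false := by simp [hx]; omega
        have h2 : (key x == lo) = true := by simp [hx]
        simp [List.filter_cons, h1, h2]
      · intro b hb
        rcases List.mem_append.mp hb with h | h
        · exact hB b h
        · simpa using (by simpa using h : b = x) ▸ hx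

theorem sorted_rev_two_partition (key : List Int → Int) (hi lo : Int) (hlo : lo < hi)
    (xs : List (List Int)) (hx : ∀ x ∈ xs, key x = hi ∨ key x = lo) :
    PySem.List.sorted xs key true
      = xs.filter (fun x => key x == hi) ++ xs.filter (fun x => key x == lo) := by
  rw [PySem.List.sorted_rev_eq_foldl_insertBy]
  have h := partition_fold key hi lo hlo xs [] [] hx (by simp) (by simp)
  simpa using h

-- ===================== list-shape helpers =====================
theorem foldl_two_append {α β : Type} (xs : List α) (p q : α → List β) :
    ∀ acc : List (List β),
    xs.foldl (fun a x => (a ++ [p x]) ++ [q x]) acc = acc ++ xs.flatMap (fun x => [p x, q x]) := by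
  induction xs with
  | nil => intro acc; simp
  | cons x t ih =>
    intro acc
    rw [List.foldl_cons, ih]
    simp [List.flatMap_cons, List.append_assoc, ← List.flatMap_def]

theorem flatten_flatMap' {α β : Type} (l : List α) (f : α → List (List β)) :
    (l.flatMap f).flatten = l.flatMap (fun a => (f a).flatten) := by
  induction l with
  | nil => rfl
  | cons x t ih => simp [List.flatMap_cons, List.flatten_append, ih]

theorem filter_flatMap' {α β : Type} (l : List α) (f : α → List β) (p : β → Bool) :
    (l.flatMap f).filter p = l.flatMap (fun a => (f a).filter p) := by
  induction l with
  | nil => rfl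
  | cons x t ih => simp [List.flatMap_cons, List.filter_append, ih]

theorem filter_replicate' {α : Type} (n : Nat) (a : α) (p : α → Bool) :
    (List.replicate n a).filter p = if p a then List.replicate n a else [] := by
  induction n with
  | zero => simp
  | succ k ih =>
    rw [List.replicate_succ, List.filter_cons]
    by_cases h : p a <;> simp [h, ih, List.replicate_succ]

theorem flatten_replicate_pair (m : Nat) (i : Int) :
    (List.replicate m ([i, i] : List Int)).flatten = List.replicate (2 * m) i := by
  induction m with
  | zero => rfl
  | succ k ih =>
    rw [List.replicate_succ, List.flatten_cons, ih,
      show 2 * (k + 1) = 2 + 2 * k by ring, List.replicate_add]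
    rfl

theorem flatten_replicate_single (m : Nat) (i : Int) :
    (List.replicate m ([i] : List Int)).flatten = List.replicate m i := by
  induction m with
  | zero => rfl
  | succ k ih => rw [List.replicate_succ, List.flatten_cons, ih, List.replicate_succ]; rfl

theorem flatMap_range_getD (u : List Int) (g : Int → List Int) :
    (List.range u.length).flatMap (fun j => g (u.getD j 0)) = u.flatMap g := by
  induction u using List.reverseRecOn with
  | nil => rfl
  | append_singleton t a ih =>
    rw [List.length_append, List.length_cons, List.length_nil, Nat.zero_add, List.range_succ,
      List.flatMap_append, List.flatMap_append]
    congr 1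
    · rw [← ih]
      refine List.flatMap_congr ?_
      intro j hj
      have hjlt : j < t.length := List.mem_range.mp hj
      rw [List.getD_eq_getElem?_getD, List.getD_eq_getElem?_getD,
        List.getElem?_append_left hjlt]
    · have ha : (t ++ [a]).getD t.length 0 = a := by
        rw [List.getD_eq_getElem?_getD, List.getElem?_concat_length]; rfl
      simp [ha]

-- ===================== lex order facts =====================
theorem cons_lt_cons_head {i j : Int} (h : i < j) (s t : List Int) : (i :: s) < (j :: t) :=
  (List.lt_iff_lex_lt _ _).mpr (List.Lex.rel h)

theorem single_lt_pair (i : Int) : ([i] : List Int) < [i, i] :=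
  (List.lt_iff_lex_lt _ _).mpr (List.Lex.cons List.Lex.nil)

-- ===================== first sort characterization =====================
theorem sort1_eq (m : Int) (c r : Int → Nat) :
    PySem.List.sorted
      ((PySem.List.pyRange 0 m 1).flatMap
        (fun i => List.replicate (c i) [i, i] ++ List.replicate (r i) [i]))
      (fun x => x) false
    = (PySem.List.pyRange 0 m 1).flatMap
        (fun i => List.replicate (r i) [i] ++ List.replicate (c i) [i, i]) := by
  have hperm : ((PySem.List.pyRange 0 m 1).flatMap
        (fun i => List.replicate (r i) [i] ++ List.replicate (c i) [i, i])).Perm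
      ((PySem.List.pyRange 0 m 1).flatMap
        (fun i => List.replicate (c i) [i, i] ++ List.replicate (r i) [i])) :=
    List.Perm.flatMap_left _ (fun i _ => List.perm_append_comm)
  have hpw : ((PySem.List.pyRange 0 m 1).flatMap
        (fun i => List.replicate (r i) [i] ++ List.replicate (c i) [i, i])).Pairwise (· ≤ ·) := by
    rw [List.flatMap_def, List.pairwise_flatten]
    constructor
    · intro seg hseg
      obtain ⟨i, -, rfl⟩ := List.mem_map.mp hseg
      rw [List.pairwise_append]
      refine ⟨List.pairwise_replicate.mpr (Or.inr (le_refl _)),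
        List.pairwise_replicate.mpr (Or.inr (le_refl _)), ?_⟩
      intro a ha b hb
      rw [List.eq_of_mem_replicate ha, List.eq_of_mem_replicate hb]
      exact le_of_lt (single_lt_pair i)
    · rw [List.pairwise_map]
      refine (PySem.List.pairwise_lt_pyRange_one 0 m).imp ?_
      intro i j hij x hx y hy
      rcases List.mem_append.mp hx with h | h <;>
        rcases List.mem_append.mp hy with h' | h' <;>
        rw [List.eq_of_mem_replicate h, List.eq_of_mem_replicate h'] <;>
        exact le_of_lt (cons_lt_cons_head hij _ _)
  have h2 := PySem.List.sorted_id_eq_of_perm_of_pairwise _ _ hperm hpw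
  exact (sorted_ext _ _ _ rfl).trans h2

-- ===================== count lemma =====================
theorem count_mapped (l : List Int) (j : Nat) (hj : j < (PySem.Set.ofList l).length) :
    PySem.List.count
      (l.map (fun x => (((PySem.List.index? (PySem.Set.ofList l) x).getD 0 : Nat) : Int)))
      ((j : Nat) : Int)
    = List.count ((PySem.Set.ofList l).getD j 0) l := by
  rw [PySem.List.count_eq, List.count_eq_countP, List.countP_map, List.count_eq_countP]
  refine List.countP_congr ?_
  intro x hxl
  have hxu : x ∈ PySem.Set.ofList l := (PySem.Set.mem_ofList l x).mpr hxl
  have hs : (PySem.List.index? (PySem.Set.ofList l) x).isSome = true :=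
    (PySem.List.index?_isSome_iff _ x).mpr hxu
  obtain ⟨p, hp⟩ := Option.isSome_iff_exists.mp hs
  obtain ⟨hplt, hpx, -⟩ := PySem.List.getElem_of_index?_eq_some hp
  have hgd : (PySem.Set.ofList l).getD j 0 = (PySem.Set.ofList l)[j] :=
    List.getD_eq_getElem _ 0 hj
  simp only [Function.comp, hp, Option.getD_some, beq_iff_eq]
  constructor
  · intro h
    have hpj : p = j := by exact_mod_cast h
    subst hpj
    rw [hgd]
    exact hpx.symm
  · intro h
    have he : (PySem.Set.ofList l)[p] = (PySem.Set.ofList l)[j] := by rw [hpx, h, hgd]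
    have hpj : p = j := ((PySem.Set.nodup_ofList l).getElem_inj_iff).mp he
    exact_mod_cast congrArg (fun n : Nat => (n : Int)) hpj

theorem count_mapped' (l : List Int) (i : Int) (h0 : 0 ≤ i)
    (hlt : i < ((PySem.Set.ofList l).length : Int)) :
    PySem.List.count
      (l.map (fun x => (((PySem.List.index? (PySem.Set.ofList l) x).getD 0 : Nat) : Int))) i
    = List.count ((PySem.Set.ofList l).getD i.toNat 0) l := by
  have h := count_mapped l i.toNat (by omega)
  rwa [show ((i.toNat : Nat) : Int) = i by omega] at h

theorem fold_enum_get?' (u : List Int) (i : Int) (h0 : 0 ≤ i) (hlt : i < (u.length : Int))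
    (d0 : PySem.Dict Int Int) :
    (((PySem.List.enumerate u 0).foldl (fun d p => d.insert p.1 p.2) d0).get? i)
      = some (u.getD i.toNat 0) := by
  have h := fold_enum_get? u 0 d0 i.toNat (by omega)
  rwa [show (0 : Int) + (i.toNat : Int) = i by omega] at h

theorem repl_if (c : Nat) (x : Int) :
    List.replicate (if (c % 2 == 0) then 0 else 1) x = if c % 2 = 1 then [x] else [] := by
  rcases Nat.mod_two_eq_zero_or_one c with h | h <;> simp [h]

-- ===================== B side =====================
theorem b_foldl (u : List Int) (cnt : Int → Int) (hc : ∀ x ∈ u, 0 ≤ cnt x) :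
    ∀ (p0 r0 : List Int),
    ((u.map (fun k => (k, cnt k))).foldl
      (fun (pr : List Int × List Int) xc =>
        let pairs := pr.1 ++ PySem.List.pyRepeat [xc.1] (2 * PySem.Int.floordiv xc.2 2)
        if PySem.Int.mod xc.2 2 ≠ 0 then (pairs, pr.2 ++ [xc.1]) else (pairs, pr.2)) (p0, r0))
    = (p0 ++ u.flatMap (fun x => List.replicate (2 * ((cnt x).toNat / 2)) x),
       r0 ++ u.flatMap (fun x => if (cnt x).toNat % 2 = 1 then [x] else [])) := by
  induction u with
  | nil => intro p0 r0; simp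
  | cons x t ih =>
    intro p0 r0
    have hx0 : 0 ≤ cnt x := hc x List.mem_cons_self
    have hrep : PySem.List.pyRepeat [x] (2 * PySem.Int.floordiv (cnt x) 2)
        = List.replicate (2 * ((cnt x).toNat / 2)) x := by
      rw [PySem.List.pyRepeat_singleton, PySem.Int.floordiv_eq_ediv_of_pos (by norm_num)]
      congr 1
      omega
    have hmod : (PySem.Int.mod (cnt x) 2 ≠ 0) ↔ ((cnt x).toNat % 2 = 1) := by
      rw [PySem.Int.mod_eq_emod_of_pos (by norm_num)]
      omega
    rw [List.map_cons, List.foldl_cons]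
    by_cases hodd : (cnt x).toNat % 2 = 1
    · simp only [hrep, if_pos (hmod.mpr hodd)]
      rw [ih (fun y hy => hc y (List.mem_cons_of_mem x hy)) _ _]
      simp [List.flatMap_cons, hodd, List.append_assoc]
    · simp only [hrep, if_neg (fun hcon => hodd (hmod.mp hcon))]
      rw [ih (fun y hy => hc y (List.mem_cons_of_mem x hy)) _ _]
      have hodd' : (cnt x).toNat % 2 = 0 := by omega
      simp [List.flatMap_cons, hodd', List.append_assoc]

theorem b_eq_nf (l : List Int) : sort_pair_alt l = nfPairs l ++ nfResid l := by
  simp only [sort_pair_alt]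
  rw [PySem.Dict.foldl_insert_getD_add_one_eq_counter, PySem.Dict.items_counter,
    b_foldl (PySem.Set.ofList l) (fun k => (List.count k l : Int))
      (fun x _ => Int.natCast_nonneg _) [] []]
  simp only [Int.toNat_natCast, List.nil_append]
  rfl

theorem repl_two (i : Int) : List.replicate 2 i = [i, i] := rfl

-- ===================== main equivalence =====================
theorem a_eq_nf (l : List Int) : sort_pair l = nfPairs l ++ nfResid l := by
  simp only [sort_pair, pyflatten]
  rw [ltmp_eq l, uniques_sorted_eq l]
  rw [show (l.map (fun li =>
        (((PySem.List.enumerate (PySem.Set.ofList l) 0).foldl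
            (fun d p => d.insert p.2 p.1) PySem.Dict.empty).get? li).getD 0))
      = l.map (fun x => (((PySem.List.index? (PySem.Set.ofList l) x).getD 0 : Nat) : Int)) from
    List.map_congr_left (fun x hxl => by
      rw [fold_swap_get? (PySem.Set.ofList l) 0 _ x (PySem.Set.nodup_ofList l),
        if_pos ((PySem.Set.mem_ofList l x).mpr hxl)]
      simp)]
  rw [foldl_two_append, List.nil_append, flatten_flatMap']
  simp only [List.flatten_cons, List.flatten_nil, List.append_nil]
  simp only [ite_self, PySem.List.pyRepeat_singleton, Int.toNat_natCast,
    show ((2:Int)).toNat = 2 from rfl, repl_two, apply_ite Int.toNat,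
    show ((0:Int)).toNat = 0 from rfl, show ((1:Int)).toNat = 1 from rfl]
  rw [sort1_eq]
  rw [sorted_rev_two_partition (fun x => (x.length : Int)) 2 1 (by norm_num) _ ?hx]
  case hx =>
    intro x hx
    obtain ⟨i, -, hmem⟩ := List.mem_flatMap.mp hx
    rcases List.mem_append.mp hmem with h | h
    · rw [List.eq_of_mem_replicate h]; right; simp
    · rw [List.eq_of_mem_replicate h]; left; simp
  rw [filter_flatMap', filter_flatMap']
  have e2 : ∀ (rr cc : Nat) (i : Int),
      ((List.replicate rr [i] ++ List.replicate cc [i, i]).filter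
        (fun x => ((x.length : Int)) == 2)) = List.replicate cc [i, i] := by
    intro rr cc i
    rw [List.filter_append, filter_replicate', filter_replicate']
    simp
  have e1 : ∀ (rr cc : Nat) (i : Int),
      ((List.replicate rr [i] ++ List.replicate cc [i, i]).filter
        (fun x => ((x.length : Int)) == 1)) = List.replicate rr [i] := by
    intro rr cc i
    rw [List.filter_append, filter_replicate', filter_replicate']
    simp
  simp only [e1, e2]
  rw [List.flatten_append, flatten_flatMap', flatten_flatMap']
  simp only [flatten_replicate_pair, flatten_replicate_single]
  rw [List.map_append, List.map_flatMap, List.map_flatMap]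
  simp only [List.map_replicate]
  congr 1
  · rw [List.flatMap_congr (g := fun i => List.replicate
        (2 * (List.count ((PySem.Set.ofList l).getD i.toNat 0) l / 2))
        ((PySem.Set.ofList l).getD i.toNat 0)) ?pb]
    case pb =>
      intro i hi
      obtain ⟨h0i, hlt⟩ := PySem.List.mem_pyRange_one.mp hi
      rw [count_mapped' l i h0i hlt, fold_enum_get?' _ i h0i hlt]
      simp
    rw [PySem.List.pyRange_zero_natCast, List.flatMap_map]
    simp only [Int.toNat_natCast]
    rw [flatMap_range_getD (PySem.Set.ofList l)
      (fun x => List.replicate (2 * (List.count x l / 2)) x)]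
    rfl
  · rw [List.flatMap_congr (g := fun i =>
        if List.count ((PySem.Set.ofList l).getD i.toNat 0) l % 2 = 1
        then [(PySem.Set.ofList l).getD i.toNat 0] else []) ?rb]
    case rb =>
      intro i hi
      obtain ⟨h0i, hlt⟩ := PySem.List.mem_pyRange_one.mp hi
      rw [count_mapped' l i h0i hlt, fold_enum_get?' _ i h0i hlt]
      simp only [Option.getD_some]
      rw [repl_if]
    rw [PySem.List.pyRange_zero_natCast, List.flatMap_map]
    simp only [Int.toNat_natCast]
    rw [flatMap_range_getD (PySem.Set.ofList l)
      (fun x => if List.count x l % 2 = 1 then [x] else [])]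
    rfl

-- ===== VERDICT (by name: the statement is the Claim_ definition above) =====
theorem sort_pair_spec : Claim_equal_sort_pair := by
  intro l _
  unfold Spec_sort_pair
  rw [a_eq_nf, b_eq_nf]
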